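-- pv_equiv track=rewrite | github.com/OZ77ARIEL/- | room3/room.py | check_duplicate_strings
-- ===== SOURCE A (Python) =====
-- def check_duplicate_strings(list1, list2):
--     """
--     Function to check if there are any duplicate strings that appear in both
--     given lists of strings. Returns True if there are any such strings,
--     otherwise False.
--     """
--     if (list1==[] or list2==[]):
--       return False
--     seen_strings = set()
--     for string in list1:
--         if string in seen_strings:
--             return True
--         seen_strings.add(string)
--     for string in list2:
--         if string in seen_strings:
--             return True
--         seen_strings.add(string)
--     return False
-- ===== SOURCE B (Python) =====
-- def check_duplicate_strings(list1, list2):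
--     if list1 == [] or list2 == []:
--         return False
--     combined = list1 + list2
--     return len(set(combined)) != len(combined)
-- ===== Notes on version B (the rewrite author's own statement) =====
-- stated objective: simpler
-- what changed: Replaces the two incremental seen-set scans with early exit by building the full set of the concatenation once and comparing its size to the list length.
import Mathlib
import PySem

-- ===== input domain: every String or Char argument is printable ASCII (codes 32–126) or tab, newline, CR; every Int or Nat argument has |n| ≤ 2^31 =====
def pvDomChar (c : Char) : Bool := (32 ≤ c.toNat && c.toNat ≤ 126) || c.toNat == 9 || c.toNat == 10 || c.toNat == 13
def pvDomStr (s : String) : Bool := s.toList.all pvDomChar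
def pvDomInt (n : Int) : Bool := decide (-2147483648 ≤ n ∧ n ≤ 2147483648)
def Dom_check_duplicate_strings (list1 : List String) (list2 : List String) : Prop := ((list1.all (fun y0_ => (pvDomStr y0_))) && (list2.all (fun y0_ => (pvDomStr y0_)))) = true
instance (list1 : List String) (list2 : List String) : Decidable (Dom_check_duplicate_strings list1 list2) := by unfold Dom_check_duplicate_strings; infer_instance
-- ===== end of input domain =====

-- ===== PORT A =====
-- B replaces A's two early-exit scans with one set-size-vs-length comparison on the concatenation (objective: simpler).
-- helper for A: one Python 'for' loop with early 'return True'; 'none' = returned True, 'some s' = fell through with seen-set s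
def pvScanA (seen : PySem.Set String) : List String → Option (PySem.Set String)
  | [] => some seen
  | x :: rest =>
      if PySem.Set.contains seen x then none
      else pvScanA (PySem.Set.add seen x) rest

def check_duplicate_strings (list1 : List String) (list2 : List String) : Bool :=
  if list1 = [] ∨ list2 = [] then false
  else
    match pvScanA PySem.Set.empty list1 with
    | none => true
    | some seen =>
        match pvScanA seen list2 with
        | none => true
        | some _ => false

-- ===== PORT B =====
def check_duplicate_strings_alt (list1 : List String) (list2 : List String) : Bool :=
  if list1 = [] ∨ list2 = [] then false
  else
    let combined := list1 ++ list2
    decide (PySem.Set.len (PySem.Set.ofList combined) ≠ PySem.List.len combined)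

-- ===== PRECONDITION & SPEC =====
def Spec_check_duplicate_strings (list1 : List String) (list2 : List String) (out : Bool) : Prop := out = check_duplicate_strings_alt list1 list2
instance (list1 : List String) (list2 : List String) (out : Bool) : Decidable (Spec_check_duplicate_strings list1 list2 out) := by unfold Spec_check_duplicate_strings; infer_instance

-- ===== CLAIM (what is proved, stated in full; the proofs are below) =====
def Claim_equal_check_duplicate_strings : Prop := ∀ (list1 : List String) (list2 : List String), Dom_check_duplicate_strings list1 list2 → Spec_check_duplicate_strings list1 list2 (check_duplicate_strings list1 list2)

-- ===== LEMMAS AND PROOFS =====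

theorem pvScanA_append (l1 l2 : List String) : ∀ (seen : PySem.Set String),
    pvScanA seen (l1 ++ l2) = (pvScanA seen l1).bind (fun s => pvScanA s l2) := by
  induction l1 with
  | nil => intro seen; simp [pvScanA]
  | cons x r ih =>
      intro seen
      by_cases h : x ∈ seen
      · simp [pvScanA, h]
      · simp [pvScanA, h, ih]

theorem pvScanA_none_iff (l : List String) : ∀ (seen : PySem.Set String), seen.Nodup →
    (pvScanA seen l = none ↔ ¬ (seen ++ l).Nodup) := by
  induction l with
  | nil => intro seen hn; simpa [pvScanA] using hn
  | cons x r ih =>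
      intro seen hn
      by_cases h : x ∈ seen
      · have hLHS : pvScanA seen (x :: r) = none := by simp [pvScanA, h]
        refine iff_of_true hLHS fun hnd => ?_
        rcases List.nodup_append.mp hnd with ⟨_, _, hdisj⟩
        exact hdisj x h x List.mem_cons_self rfl
      · have hadd : PySem.Set.add seen x = seen ++ [x] := by
          simp [PySem.Set.add, h]
        have hn' : (seen ++ [x]).Nodup := by
          rw [List.nodup_append]
          refine ⟨hn, List.nodup_singleton x, ?_⟩
          intro a ha b hb heq
          rw [List.mem_singleton] at hb
          exact h ((heq.trans hb) ▸ ha)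
        have hih := ih (seen ++ [x]) hn'
        rw [show seen ++ x :: r = (seen ++ [x]) ++ r by simp]
        simpa [pvScanA, h, hadd] using hih

-- foldl add s l = s ++ t for some sublist t of l (set growth is a sublist of the input)
theorem foldl_add_sublist (l : List String) : ∀ (s : PySem.Set String),
    ∃ t, t.Sublist l ∧ l.foldl PySem.Set.add s = s ++ t := by
  induction l with
  | nil => intro s; exact ⟨[], by simp⟩
  | cons x r ih =>
      intro s
      by_cases h : x ∈ s
      · rcases ih s with ⟨t, ht, he⟩
        exact ⟨t, ht.cons _, by simpa [PySem.Set.add, h] using he⟩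
      · rcases ih (s ++ [x]) with ⟨t, ht, he⟩
        exact ⟨x :: t, ht.cons₂ _, by simpa [PySem.Set.add, h] using he⟩

-- on a duplicate-free input the fold adds every element
theorem foldl_add_of_nodup (l : List String) : ∀ (s : PySem.Set String),
    (s ++ l).Nodup → l.foldl PySem.Set.add s = s ++ l := by
  induction l with
  | nil => intro s _; simp
  | cons x r ih =>
      intro s hn
      rw [show s ++ x :: r = (s ++ [x]) ++ r by simp] at hn
      have h1 : (s ++ [x]).Nodup := hn.sublist (List.sublist_append_left _ _)
      have hx : x ∉ s := by
        rcases List.nodup_append.mp h1 with ⟨_, _, hd⟩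
        exact fun hm => hd x hm x (List.mem_singleton_self x) rfl
      simp only [List.foldl_cons]
      rw [show PySem.Set.add s x = s ++ [x] by simp [PySem.Set.add, hx]]
      simpa using ih (s ++ [x]) hn

theorem ofList_length_eq_iff (l : List String) :
    (PySem.Set.ofList l).length = l.length ↔ l.Nodup := by
  constructor
  · intro h
    rcases foldl_add_sublist l [] with ⟨t, ht, he⟩
    have heq : PySem.Set.ofList l = t := by simpa using he
    have : t = l := ht.eq_of_length (by rw [← heq, h])
    have hnd := PySem.Set.nodup_ofList l
    rwa [heq, this] at hnd
  · intro h
    have := foldl_add_of_nodup l [] (by simpa using h)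
    have h2 : PySem.Set.ofList l = l := by
      rw [PySem.Set.ofList_eq_foldl, this]; simp
    rw [h2]

theorem check_dup_eq (list1 list2 : List String) :
    check_duplicate_strings list1 list2 = check_duplicate_strings_alt list1 list2 := by
  by_cases hemp : list1 = [] ∨ list2 = []
  · simp [check_duplicate_strings, check_duplicate_strings_alt, hemp]
  · have hnone : (pvScanA PySem.Set.empty (list1 ++ list2) = none) ↔ ¬ (list1 ++ list2).Nodup := by
      simpa [PySem.Set.empty] using
        pvScanA_none_iff (list1 ++ list2) PySem.Set.empty List.nodup_nil
    have hb : check_duplicate_strings_alt list1 list2 = decide (¬ (list1 ++ list2).Nodup) := by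
      unfold check_duplicate_strings_alt
      rw [if_neg hemp]
      refine decide_eq_decide.mpr (not_congr ?_)
      unfold PySem.Set.len PySem.List.len
      exact_mod_cast ofList_length_eq_iff (list1 ++ list2)
    have ha : check_duplicate_strings list1 list2
        = ((pvScanA PySem.Set.empty list1).bind (fun s => pvScanA s list2)).isNone := by
      unfold check_duplicate_strings
      rw [if_neg hemp]
      cases h1 : pvScanA PySem.Set.empty list1 with
      | none => simp
      | some s => cases h2 : pvScanA s list2 <;> simp [h2]
    rw [ha, hb, ← pvScanA_append]
    cases h : pvScanA PySem.Set.empty (list1 ++ list2) with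
    | none => simp [hnone.mp h]
    | some s =>
        have hnd : (list1 ++ list2).Nodup := by
          by_contra hc
          have := hnone.mpr hc
          rw [h] at this
          simp at this
        simp [hnd]

-- ===== VERDICT (by name: the statement is the Claim_ definition above) =====
theorem check_duplicate_strings_spec : Claim_equal_check_duplicate_strings := by
  intro list1 list2 _
  exact check_dup_eq list1 list2
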